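-- pv_equiv track=rewrite | github.com/Hirekari-Abhishek-Raj/Python | both-x.py | bothCountX
-- ===== SOURCE A (Python) =====
-- def bothCountX(string1, string2, x):
--     # Complete this function, and return the list of resultant characters in sorted order
--     string1=string1.lower()
--     string2=string2.lower()
--     lst=[]
--     if len(string1)<=len(string2):
--         for i in string1:
--             if i not in lst:
--                 new1=string1.count(i)
--                 new2=string2.count(i)
--                 if new1==new2==x :
--                     lst.append(i)
--     else:
--         for i in string2:
--             if i not in lst:
--                 new1=string1.count(i)
--                 new2=string2.count(i)
--                 if new1==new2==x :
--                     lst.append(i)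
--
--     lst.sort()
--     return lst
-- ===== SOURCE B (Python) =====
-- def bothCountX(string1, string2, x):
--     s1 = string1.lower()
--     s2 = string2.lower()
--     c1 = {}
--     for ch in s1:
--         c1[ch] = c1.get(ch, 0) + 1
--     c2 = {}
--     for ch in s2:
--         c2[ch] = c2.get(ch, 0) + 1
--     return sorted(ch for ch in c1 if ch in c2 and c1[ch] == x and c2[ch] == x)
-- ===== Notes on version B (the rewrite author's own statement) =====
-- stated objective: faster
-- what changed: Replaces A's length-branch, per-character .count rescans and dedup-by-membership list with two frequency dicts built in one pass each and a single filtering pass over the first dict's keys intersected with the second's.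
import Mathlib
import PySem

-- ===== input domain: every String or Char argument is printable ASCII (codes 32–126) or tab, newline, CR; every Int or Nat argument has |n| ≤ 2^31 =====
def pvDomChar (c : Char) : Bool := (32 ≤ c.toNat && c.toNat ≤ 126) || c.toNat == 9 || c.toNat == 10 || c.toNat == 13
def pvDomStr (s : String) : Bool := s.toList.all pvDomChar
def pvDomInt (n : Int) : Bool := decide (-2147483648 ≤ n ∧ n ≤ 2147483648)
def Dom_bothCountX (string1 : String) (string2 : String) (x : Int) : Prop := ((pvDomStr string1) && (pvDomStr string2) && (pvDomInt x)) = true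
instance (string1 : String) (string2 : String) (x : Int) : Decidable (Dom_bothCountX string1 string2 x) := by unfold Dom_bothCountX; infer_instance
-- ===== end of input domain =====

-- B replaces A's length branch, repeated .count rescans and dedup-by-membership list
-- with two one-pass frequency dicts and a single filtering pass over the shared keys (objective: faster).
-- Python's 1-char strings are ported as Chars and turned into singleton Strings at return;
-- on 1-char strings Python's sort order coincides with Char order.

-- ===== PORT A =====
def bothCountX (string1 : String) (string2 : String) (x : Int) : List String :=
  let s1 := PySem.Chars.lower string1.toList      -- string1 = string1.lower()
  let s2 := PySem.Chars.lower string2.toList      -- string2 = string2.lower()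
  -- loop body, identical in both branches of A
  let step : List Char → Char → List Char := fun lst i =>
    if i ∈ lst then lst
    else
      let new1 : Int := s1.count i
      let new2 : Int := s2.count i
      if new1 = new2 ∧ new2 = x then lst ++ [i] else lst
  let lst :=
    if s1.length ≤ s2.length then s1.foldl step []
    else s2.foldl step []
  (PySem.List.sorted lst (fun c => c) false).map (fun c => String.ofList [c])

-- ===== PORT B =====
def bothCountX_alt (string1 : String) (string2 : String) (x : Int) : List String :=
  let s1 := PySem.Chars.lower string1.toList
  let s2 := PySem.Chars.lower string2.toList
  let c1 : PySem.Dict Char Int := s1.foldl (fun d ch => d.insert ch (d.getD ch 0 + 1)) PySem.Dict.empty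
  let c2 : PySem.Dict Char Int := s2.foldl (fun d ch => d.insert ch (d.getD ch 0 + 1)) PySem.Dict.empty
  let keep := c1.keys.filter (fun ch => c2.contains ch && (c1.getD ch 0 == x) && (c2.getD ch 0 == x))
  (PySem.List.sorted keep (fun c => c) false).map (fun c => String.ofList [c])

-- ===== PRECONDITION & SPEC =====
def Spec_bothCountX (string1 : String) (string2 : String) (x : Int) (out : List String) : Prop := out = bothCountX_alt string1 string2 x
instance (string1 : String) (string2 : String) (x : Int) (out : List String) : Decidable (Spec_bothCountX string1 string2 x out) := by unfold Spec_bothCountX; infer_instance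

-- ===== CLAIM (what is proved, stated in full; the proofs are below) =====
def Claim_equal_bothCountX : Prop := ∀ (string1 : String) (string2 : String) (x : Int), Dom_bothCountX string1 string2 x → Spec_bothCountX string1 string2 x (bothCountX string1 string2 x)

-- ===== LEMMAS AND PROOFS =====

-- membership in A's dedup-append fold
theorem memA (s1 s2 : List Char) (x : Int) (l acc : List Char) (c : Char) :
    c ∈ l.foldl (fun lst i =>
      if i ∈ lst then lst
      else if ((s1.count i : Int) = (s2.count i : Int) ∧ (s2.count i : Int) = x) then lst ++ [i] else lst) acc
    ↔ c ∈ acc ∨ (c ∈ l ∧ (s1.count c : Int) = x ∧ (s2.count c : Int) = x) := by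
  induction l generalizing acc with
  | nil => simp
  | cons a t ih =>
    rw [List.foldl_cons, ih]
    by_cases ha : a ∈ acc
    · rw [if_pos ha]
      simp only [List.mem_cons]
      constructor
      · rintro (h | h)
        · exact Or.inl h
        · exact Or.inr ⟨Or.inr h.1, h.2⟩
      · rintro (h | ⟨(rfl | h), hp⟩)
        · exact Or.inl h
        · exact Or.inl ha
        · exact Or.inr ⟨h, hp⟩
    · rw [if_neg ha]
      by_cases hp : ((s1.count a : Int) = (s2.count a : Int) ∧ (s2.count a : Int) = x)
      · rw [if_pos hp]
        simp only [List.mem_append, List.mem_cons, List.not_mem_nil, or_false]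
        constructor
        · rintro ((h | rfl) | h)
          · exact Or.inl h
          · exact Or.inr ⟨Or.inl rfl, hp.1.trans hp.2, hp.2⟩
          · exact Or.inr ⟨Or.inr h.1, h.2⟩
        · rintro (h | ⟨(rfl | h), h1, h2⟩)
          · exact Or.inl (Or.inl h)
          · exact Or.inl (Or.inr rfl)
          · exact Or.inr ⟨h, h1, h2⟩
      · rw [if_neg hp]
        simp only [List.mem_cons]
        constructor
        · rintro (h | h)
          · exact Or.inl h
          · exact Or.inr ⟨Or.inr h.1, h.2⟩
        · rintro (h | ⟨(rfl | h), h1, h2⟩)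
          · exact Or.inl h
          · exact absurd ⟨h1.trans h2.symm, h2⟩ hp
          · exact Or.inr ⟨h, h1, h2⟩

-- A's fold keeps the accumulator duplicate-free
theorem nodupA (s1 s2 : List Char) (x : Int) (l acc : List Char) (h : acc.Nodup) :
    (l.foldl (fun lst i =>
      if i ∈ lst then lst
      else if ((s1.count i : Int) = (s2.count i : Int) ∧ (s2.count i : Int) = x) then lst ++ [i] else lst) acc).Nodup := by
  induction l generalizing acc with
  | nil => exact h
  | cons a t ih =>
    rw [List.foldl_cons]
    apply ih
    by_cases ha : a ∈ acc
    · rw [if_pos ha]; exact h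
    · rw [if_neg ha]
      by_cases hp : ((s1.count a : Int) = (s2.count a : Int) ∧ (s2.count a : Int) = x)
      · rw [if_pos hp]
        exact h.append (List.nodup_singleton a)
          (fun b hb hbs => ha ((List.mem_singleton.mp hbs) ▸ hb))
      · rw [if_neg hp]; exact h

theorem count_pos_int (l : List Char) (c : Char) (x : Int) (hx : (l.count c : Int) = x) (hmem : c ∈ l) : 1 ≤ x := by
  have := List.count_pos_iff.mpr hmem
  omega

theorem bothCountX_eq (string1 string2 : String) (x : Int) :
    bothCountX string1 string2 x = bothCountX_alt string1 string2 x := by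
  unfold bothCountX bothCountX_alt
  simp only []
  set s1 := PySem.Chars.lower string1.toList with hs1
  set s2 := PySem.Chars.lower string2.toList with hs2
  -- B's dict-building loops are Counter(s1), Counter(s2)
  rw [PySem.Dict.foldl_insert_getD_add_one_eq_counter, PySem.Dict.foldl_insert_getD_add_one_eq_counter]
  set keep := (PySem.Dict.counter s1).keys.filter
      (fun ch => (PySem.Dict.counter s2).contains ch &&
        ((PySem.Dict.counter s1).getD ch 0 == x) && ((PySem.Dict.counter s2).getD ch 0 == x)) with hkeep
  have hkeepmem : ∀ c : Char, c ∈ keep ↔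
      (c ∈ s1 ∧ c ∈ s2 ∧ (s1.count c : Int) = x ∧ (s2.count c : Int) = x) := by
    intro c
    simp only [hkeep, List.mem_filter, PySem.Dict.keys_counter, PySem.Set.mem_ofList,
      PySem.Dict.contains_counter, PySem.Dict.getD_counter, Bool.and_eq_true, beq_iff_eq,
      List.contains_iff_mem]
    tauto
  have hkeepnd : keep.Nodup := by
    apply List.Nodup.filter
    rw [PySem.Dict.keys_counter (xs := s1)]
    exact PySem.Set.nodup_ofList (xs := s1)
  have main : ∀ lst : List Char,
      lst.Nodup → (∀ c : Char, c ∈ lst ↔ c ∈ keep) →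
      (PySem.List.sorted lst (fun c => c) false).map (fun c => String.ofList [c]) =
      (PySem.List.sorted keep (fun c => c) false).map (fun c => String.ofList [c]) := by
    intro lst hnd hmem
    have hperm : lst.Perm keep := (List.perm_ext_iff_of_nodup hnd hkeepnd).mpr hmem
    rw [PySem.List.sorted_eq_sorted_of_perm lst keep (fun c => c) (fun _ _ h => h) hperm]
  split
  case isTrue hle =>
    apply main
    · exact nodupA s1 s2 x s1 [] List.nodup_nil
    · intro c
      rw [memA, hkeepmem]
      constructor
      · rintro (h | ⟨hc1, h1, h2⟩)
        · simp at h
        · have hx := count_pos_int s1 c x h1 hc1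
          have hc2 : c ∈ s2 := List.count_pos_iff.mp (by omega)
          exact ⟨hc1, hc2, h1, h2⟩
      · rintro ⟨hc1, _, h1, h2⟩
        exact Or.inr ⟨hc1, h1, h2⟩
  case isFalse hgt =>
    apply main
    · exact nodupA s1 s2 x s2 [] List.nodup_nil
    · intro c
      rw [memA, hkeepmem]
      constructor
      · rintro (h | ⟨hc2, h1, h2⟩)
        · simp at h
        · have hx := count_pos_int s2 c x h2 hc2
          have hc1 : c ∈ s1 := List.count_pos_iff.mp (by omega)
          exact ⟨hc1, hc2, h1, h2⟩
      · rintro ⟨_, hc2, h1, h2⟩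
        exact Or.inr ⟨hc2, h1, h2⟩

-- ===== VERDICT (by name: the statement is the Claim_ definition above) =====
theorem bothCountX_spec : Claim_equal_bothCountX := by
  intro string1 string2 x _
  exact bothCountX_eq string1 string2 x
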